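-- pv_equiv track=rewrite | github.com/obask/basklab-ai | jaipur/JaipurState.py | greedy_card_exchange
-- ===== SOURCE A (Python) =====
-- DIAMOND = "diamond"
--
-- GOLD = "gold"
--
-- SILVER = "silver"
--
-- CLOTH = "cloth"
--
-- SPICE = "spice"
--
-- LEATHER = "leather"
--
-- def greedy_card_exchange(market, hand):
--     """ Do not exchange camels for now """
--     to_take = list()
--     to_give = list()
--     for handIndex, handCard in enumerate(hand):
--         if handCard in [CLOTH, SPICE, LEATHER]:
--             for marketIndex, marketCard in enumerate(market):
--                 if marketCard in [DIAMOND, GOLD, SILVER]: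
--                     to_take.append(market[marketIndex])
--                     to_give.append(hand[handIndex])
--     return to_take, to_give
-- ===== SOURCE B (Python) =====
-- DIAMOND = "diamond"
-- GOLD = "gold"
-- SILVER = "silver"
-- CLOTH = "cloth"
-- SPICE = "spice"
-- LEATHER = "leather"
--
-- def greedy_card_exchange(market, hand):
--     """ Do not exchange camels for now """
--     valuables = [c for c in market if c in (DIAMOND, GOLD, SILVER)]
--     givers = [c for c in hand if c in (CLOTH, SPICE, LEATHER)]
--     to_take = valuables * len(givers)
--     to_give = [h for h in givers for _ in valuables]
--     return to_take, to_give
-- ===== Notes on version B (the rewrite author's own statement) =====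
-- stated objective: simpler
-- what changed: Replaces the nested rescanning of market for every hand card by two single filter passes (valuables, givers) followed by direct construction: to_take = valuables repeated len(givers) times, to_give = each giver repeated len(valuables) times.
import Mathlib
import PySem

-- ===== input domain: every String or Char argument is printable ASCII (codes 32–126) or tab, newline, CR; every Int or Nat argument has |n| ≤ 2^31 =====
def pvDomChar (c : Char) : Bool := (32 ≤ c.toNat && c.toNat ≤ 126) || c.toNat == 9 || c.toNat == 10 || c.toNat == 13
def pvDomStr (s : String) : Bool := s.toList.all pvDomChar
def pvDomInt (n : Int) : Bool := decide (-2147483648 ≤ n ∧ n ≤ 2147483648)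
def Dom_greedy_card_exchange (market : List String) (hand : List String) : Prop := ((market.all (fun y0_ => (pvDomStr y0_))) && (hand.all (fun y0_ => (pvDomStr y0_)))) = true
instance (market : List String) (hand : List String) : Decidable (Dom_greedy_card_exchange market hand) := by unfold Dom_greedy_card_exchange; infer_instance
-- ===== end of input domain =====

-- B replaces A's nested market rescan per hand card by two filter passes and direct combination (simpler decomposition).

-- ===== PORT A =====
-- A: nested loops; for each giver hand card, scan the whole market appending each valuable.
def greedy_card_exchange (market : List String) (hand : List String) : List String × List String :=
  hand.foldl (fun acc handCard =>
    if handCard == "cloth" || handCard == "spice" || handCard == "leather" then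
      market.foldl (fun acc2 marketCard =>
        if marketCard == "diamond" || marketCard == "gold" || marketCard == "silver" then
          (acc2.1 ++ [marketCard], acc2.2 ++ [handCard])
        else acc2) acc
    else acc) ([], [])

-- ===== PORT B =====
-- B: filter valuables and givers once, then construct both lists directly.
def greedy_card_exchange_alt (market : List String) (hand : List String) : List String × List String :=
  let valuables := market.filter (fun c => c == "diamond" || c == "gold" || c == "silver")
  let givers := hand.filter (fun c => c == "cloth" || c == "spice" || c == "leather")
  (givers.flatMap (fun _ => valuables), givers.flatMap (fun h => valuables.map (fun _ => h)))

-- ===== PRECONDITION & SPEC =====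
def Spec_greedy_card_exchange (market : List String) (hand : List String) (out : List String × List String) : Prop := out = greedy_card_exchange_alt market hand
instance (market : List String) (hand : List String) (out : List String × List String) : Decidable (Spec_greedy_card_exchange market hand out) := by unfold Spec_greedy_card_exchange; infer_instance

-- ===== CLAIM (what is proved, stated in full; the proofs are below) =====
def Claim_equal_greedy_card_exchange : Prop := ∀ (market : List String) (hand : List String), Dom_greedy_card_exchange market hand → Spec_greedy_card_exchange market hand (greedy_card_exchange market hand)

-- ===== LEMMAS AND PROOFS =====

-- The inner market loop appends exactly the filtered valuables (and the giver repeated).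
theorem pv_inner (h : String) : ∀ (market : List String) (a b : List String),
    market.foldl (fun acc2 marketCard =>
        if marketCard == "diamond" || marketCard == "gold" || marketCard == "silver" then
          (acc2.1 ++ [marketCard], acc2.2 ++ [h])
        else acc2) (a, b)
    = (a ++ market.filter (fun c => c == "diamond" || c == "gold" || c == "silver"),
       b ++ (market.filter (fun c => c == "diamond" || c == "gold" || c == "silver")).map (fun _ => h)) := by
  intro market
  induction market with
  | nil => intro a b; simp
  | cons m rest ih =>
    intro a b
    by_cases hm : (m == "diamond" || m == "gold" || m == "silver") = true
    · rw [List.foldl_cons, if_pos hm, ih]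
      simp [hm]
    · rw [List.foldl_cons, if_neg hm, ih]
      simp [hm]

-- The outer hand loop appends B's flatMap results.
theorem pv_outer (market : List String) : ∀ (hand : List String) (a b : List String),
    hand.foldl (fun acc handCard =>
      if handCard == "cloth" || handCard == "spice" || handCard == "leather" then
        market.foldl (fun acc2 marketCard =>
          if marketCard == "diamond" || marketCard == "gold" || marketCard == "silver" then
            (acc2.1 ++ [marketCard], acc2.2 ++ [handCard])
          else acc2) acc
      else acc) (a, b)
    = (a ++ (hand.filter (fun c => c == "cloth" || c == "spice" || c == "leather")).flatMap
          (fun _ => market.filter (fun c => c == "diamond" || c == "gold" || c == "silver")),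
       b ++ (hand.filter (fun c => c == "cloth" || c == "spice" || c == "leather")).flatMap
          (fun h => (market.filter (fun c => c == "diamond" || c == "gold" || c == "silver")).map (fun _ => h))) := by
  intro hand
  induction hand with
  | nil => intro a b; simp
  | cons h rest ih =>
    intro a b
    by_cases hh : (h == "cloth" || h == "spice" || h == "leather") = true
    · rw [List.foldl_cons, if_pos hh, pv_inner h market a b, ih]
      simp [hh]
    · rw [List.foldl_cons, if_neg hh, ih]
      simp [hh]

-- ===== VERDICT (by name: the statement is the Claim_ definition above) =====
theorem greedy_card_exchange_spec : Claim_equal_greedy_card_exchange := by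
  intro market hand _
  unfold Spec_greedy_card_exchange greedy_card_exchange greedy_card_exchange_alt
  have := pv_outer market hand [] []
  simpa using this
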